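-- pv_equiv track=rewrite | github.com/MGezault/Cours | DevPython/TP9/TP9 Ensembles et dictionnaires-20241119/1_4_petites_betes/petites_betes.py | dico_par_famille_v2
-- ===== SOURCE A (Python) =====
-- def dico_par_famille_v2(pokedex):
--     """Construit un dictionnaire dont les les clés sont le nom de familles (str)
--     et la valeur associée est l'ensemble (set) des noms des pokemons de
--     cette famille dans le pokedex
--
--     Args:
--         pokedex (dict): un dictionnaire dont les clés sont les noms de pokemons et la
--         valeur associée l'ensemble (set) de ses familles (str)
--
--     Returns:
--         dict: un dictionnaire dont les clés sont le nom de familles (str) et la valeur associée est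
--         l'ensemble (set) des noms des pokemons de cette famille dans le pokedex
--     """
--     dico= dict()
--     #A chaque tour de boucle, tous les pokémons rencontrés sont stockés en fonction de leur type dans dico
--     for (nom,typespoke) in pokedex.items():
--         for types in typespoke:
--             if types not in dico:
--                 dico[types]= set()
--             dico[types].add(nom)
--     return dico
-- ===== SOURCE B (Python) =====
-- def dico_par_famille_v2(pokedex):
--     # Two-phase grouping: first the universe of families, then one
--     # per-family scan of the pokedex collecting the matching pokemon names.
--     familles = {f for fams in pokedex.values() for f in fams}
--     return {f: {nom for nom, fams in pokedex.items() if f in fams}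
--             for f in familles}
-- ===== Notes on version B (the rewrite author's own statement) =====
-- stated objective: alternative
-- what changed: A's single accumulating pass that grows a dict of sets is replaced by a two-phase grouping: one comprehension computes the universe of families, then a dict comprehension builds each family's set by scanning the pokedex for pokemon whose family set contains it.
import Mathlib
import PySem

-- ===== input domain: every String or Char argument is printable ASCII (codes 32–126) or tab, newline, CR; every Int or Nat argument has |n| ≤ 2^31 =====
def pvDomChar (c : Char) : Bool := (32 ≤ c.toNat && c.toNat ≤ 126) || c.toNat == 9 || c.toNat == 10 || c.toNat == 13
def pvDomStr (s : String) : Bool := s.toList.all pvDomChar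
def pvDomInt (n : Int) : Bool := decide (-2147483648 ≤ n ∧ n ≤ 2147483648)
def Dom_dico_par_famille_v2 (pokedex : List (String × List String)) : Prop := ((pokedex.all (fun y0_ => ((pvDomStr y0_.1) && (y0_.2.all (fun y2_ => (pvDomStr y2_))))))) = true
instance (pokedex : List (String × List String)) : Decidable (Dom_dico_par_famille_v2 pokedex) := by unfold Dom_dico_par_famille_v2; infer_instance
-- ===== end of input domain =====

-- B replaces A's single accumulating pass by a family-universe pass plus a per-family
-- grouping scan (objective: alternative decomposition, same results).

-- ===== PORT A =====
-- inner loop body: "if types not in dico: dico[types] = set(); dico[types].add(nom)"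
def pvStepFam (nom : String) (dico : PySem.Dict String (List String)) (types : String) :
    PySem.Dict String (List String) :=
  let dico := if dico.contains types = false then dico.insert types ([] : List String) else dico
  dico.modify types [] (fun s => PySem.Set.add s nom)

-- outer loop body: "for types in typespoke: …"
def pvStepPoke (dico : PySem.Dict String (List String)) (p : String × List String) :
    PySem.Dict String (List String) :=
  p.2.foldl (pvStepFam p.1) dico

def dico_par_famille_v2 (pokedex : List (String × List String)) : List (String × List String) :=
  (pokedex.foldl pvStepPoke PySem.Dict.empty).items

-- ===== PORT B =====
def dico_par_famille_v2_alt (pokedex : List (String × List String)) : List (String × List String) :=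
  let familles : PySem.Set String := PySem.Set.ofList (pokedex.flatMap (fun p => p.2))
  familles.map (fun f =>
    (f, (PySem.Set.ofList
          ((pokedex.filter (fun p => PySem.Set.contains p.2 f)).map (fun p => p.1)) : PySem.Set String)))

-- ===== PRECONDITION & SPEC =====
-- Pre_ excludes association lists with duplicate pokemon names: such a list does not
-- faithfully represent a Python dict (later bindings overwrite earlier ones there).
def Pre_dico_par_famille_v2 (pokedex : List (String × List String)) : Prop :=
  (pokedex.map Prod.fst).Nodup
instance (pokedex : List (String × List String)) : Decidable (Pre_dico_par_famille_v2 pokedex) := by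
  unfold Pre_dico_par_famille_v2; infer_instance

def pvWitness_dico_par_famille_v2 : (List (String × List String)) :=
  [("pika", ["electric"]), ("bulbi", ["grass", "poison"])]

def Spec_dico_par_famille_v2 (pokedex : List (String × List String)) (out : List (String × List String)) : Prop := out = dico_par_famille_v2_alt pokedex
instance (pokedex : List (String × List String)) (out : List (String × List String)) : Decidable (Spec_dico_par_famille_v2 pokedex out) := by unfold Spec_dico_par_famille_v2; infer_instance

-- ===== CLAIM (what is proved, stated in full; the proofs are below) =====
def Claim_equal_dico_par_famille_v2 : Prop := ∀ (pokedex : List (String × List String)), Dom_dico_par_famille_v2 pokedex → Pre_dico_par_famille_v2 pokedex → Spec_dico_par_famille_v2 pokedex (dico_par_famille_v2 pokedex)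

-- ===== LEMMAS AND PROOFS =====

-- value B computes for family f
def pvVals (l : List (String × List String)) (f : String) : List String :=
  PySem.Set.ofList ((l.filter (fun p => PySem.Set.contains p.2 f)).map (fun p => p.1))

-- the whole result B computes on l
def pvG (l : List (String × List String)) : List (String × List String) :=
  (PySem.Set.ofList (l.flatMap (fun p => p.2))).map (fun f => (f, pvVals l f))

lemma alt_eq_pvG (l : List (String × List String)) : dico_par_famille_v2_alt l = pvG l := rfl

lemma get?_mk_map (K : List String) (h : String → List String) (t : String) :
    (PySem.Dict.mk (K.map (fun f => (f, h f)))).get? t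
      = if t ∈ K then some (h t) else none := by
  induction K with
  | nil => simp [PySem.Dict.get?]
  | cons k K ih =>
      simp only [List.map_cons, PySem.Dict.get?_mk_cons, ih, List.mem_cons, beq_iff_eq]
      by_cases hk : k = t
      · simp [hk]
      · have hk' : ¬ t = k := fun h => hk h.symm
        simp [hk, hk']

lemma contains_mk_map (K : List String) (h : String → List String) (t : String) :
    (PySem.Dict.mk (K.map (fun f => (f, h f)))).contains t = decide (t ∈ K) := by
  rw [PySem.Dict.contains_eq_isSome_get?, get?_mk_map]
  by_cases ht : t ∈ K <;> simp [ht]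

lemma pvVals_append_nil (pre : List (String × List String)) (nom f : String) :
    pvVals (pre ++ [(nom, ([] : List String))]) f = pvVals pre f := by
  simp [pvVals, List.filter_append, PySem.Set.contains]

lemma pvG_append_nil (pre : List (String × List String)) (nom : String) :
    pvG (pre ++ [(nom, ([] : List String))]) = pvG pre := by
  simp [pvG, pvVals_append_nil]

lemma add_add_self {α : Type} [BEq α] [LawfulBEq α] (s : PySem.Set α) (x : α) :
    PySem.Set.add (PySem.Set.add s x) x = PySem.Set.add s x := by
  have h : PySem.Set.contains (PySem.Set.add s x) x = true := by
    by_cases h3 : x ∈ s <;> simp [PySem.Set.add, PySem.Set.contains, h3]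
  conv_lhs => rw [PySem.Set.add]
  rw [if_pos h]

lemma pvVals_append_ne (pre : List (String × List String)) (nom : String) (fs : List String)
    (t f : String) (hft : f ≠ t) :
    pvVals (pre ++ [(nom, fs ++ [t])]) f = pvVals (pre ++ [(nom, fs)]) f := by
  have e1 : (List.filter (fun p : String × List String => PySem.Set.contains p.2 f)
        [(nom, fs ++ [t])]).map (fun p => p.1)
      = (List.filter (fun p : String × List String => PySem.Set.contains p.2 f)
        [(nom, fs)]).map (fun p => p.1) := by
    by_cases hf : f ∈ fs <;> simp [PySem.Set.contains, hf, hft]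
  simp only [pvVals, List.filter_append, List.map_append, e1]

lemma pvVals_append_self (pre : List (String × List String)) (nom : String) (fs : List String)
    (t : String) :
    pvVals (pre ++ [(nom, fs ++ [t])]) t
      = PySem.Set.add (pvVals (pre ++ [(nom, fs)]) t) nom := by
  have e1 : (List.filter (fun p : String × List String => PySem.Set.contains p.2 t)
        [(nom, fs ++ [t])]).map (fun p => p.1) = [nom] := by
    simp [PySem.Set.contains]
  by_cases hc : t ∈ fs
  · have e2 : (List.filter (fun p : String × List String => PySem.Set.contains p.2 t)
        [(nom, fs)]).map (fun p => p.1) = [nom] := by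
      simp [PySem.Set.contains, hc]
    simp only [pvVals, List.filter_append, List.map_append, e1, e2]
    rw [PySem.Set.ofList_append_singleton]
    exact (add_add_self _ nom).symm
  · have e2 : (List.filter (fun p : String × List String => PySem.Set.contains p.2 t)
        [(nom, fs)]).map (fun p => p.1) = [] := by
      simp [PySem.Set.contains, hc]
    simp only [pvVals, List.filter_append, List.map_append, e1, e2, List.append_nil]
    rw [PySem.Set.ofList_append_singleton]

lemma pvVals_of_not_mem (pre : List (String × List String)) (nom : String) (fs : List String)
    (t : String) (hpre : t ∉ pre.flatMap (fun p => p.2)) (hfs : t ∉ fs) :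
    pvVals (pre ++ [(nom, fs)]) t = [] := by
  have hfil : pre.filter (fun p => PySem.Set.contains p.2 t) = [] := by
    rw [List.filter_eq_nil_iff]
    intro p hp hc
    exact hpre (List.mem_flatMap.mpr ⟨p, hp, by simpa [PySem.Set.contains] using hc⟩)
  have e2 : (List.filter (fun p : String × List String => PySem.Set.contains p.2 t)
        [(nom, fs)]).map (fun p => p.1) = [] := by
    simp [PySem.Set.contains, hfs]
  simp only [pvVals, List.filter_append, List.map_append, hfil, e2, List.map_nil,
    List.append_nil]
  simp [PySem.Set.ofList]

lemma stepFam_mk (pre : List (String × List String)) (nom : String) (fs : List String)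
    (t : String) :
    pvStepFam nom (PySem.Dict.mk (pvG (pre ++ [(nom, fs)]))) t
      = PySem.Dict.mk (pvG (pre ++ [(nom, fs ++ [t])])) := by
  have hG : pvG (pre ++ [(nom, fs)])
      = (PySem.Set.ofList (pre.flatMap (fun p => p.2) ++ fs)).map
          (fun f => (f, pvVals (pre ++ [(nom, fs)]) f)) := by
    simp [pvG]
  have hG' : pvG (pre ++ [(nom, fs ++ [t])])
      = (PySem.Set.ofList ((pre.flatMap (fun p => p.2) ++ fs) ++ [t])).map
          (fun f => (f, pvVals (pre ++ [(nom, fs ++ [t])]) f)) := by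
    simp [pvG]
  set K : List String := PySem.Set.ofList (pre.flatMap (fun p => p.2) ++ fs) with hK
  by_cases ht : t ∈ K
  · -- key already present: no insert of the empty set, just the add
    have hcont : (PySem.Dict.mk (pvG (pre ++ [(nom, fs)]))).contains t = true := by
      rw [hG, contains_mk_map]; simpa using ht
    have hget : (PySem.Dict.mk (pvG (pre ++ [(nom, fs)]))).getD t []
        = pvVals (pre ++ [(nom, fs)]) t := by
      rw [PySem.Dict.getD, hG, get?_mk_map]; simp [ht]
    have haddK : PySem.Set.add K t = K := by
      simp [PySem.Set.add, PySem.Set.contains, ht]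
    rw [pvStepFam, hcont]
    simp only [Bool.true_eq_false, ite_false]
    rw [PySem.Dict.modify, hget, PySem.Dict.insert, if_pos hcont]
    rw [hG', PySem.Set.ofList_append_singleton, ← hK, haddK, hG]
    congr 1
    rw [List.map_map]
    refine List.map_congr_left ?_
    intro f _
    by_cases hf : f = t
    · subst hf
      simp [pvVals_append_self]
    · simp [pvVals_append_ne pre nom fs t f hf]
      intro h
      exact absurd h hf
  · -- new key: insert the empty set, then add
    have hcont : (PySem.Dict.mk (pvG (pre ++ [(nom, fs)]))).contains t = false := by
      rw [hG, contains_mk_map]; simpa using ht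
    have hnotpre : t ∉ pre.flatMap (fun p => p.2) ∧ t ∉ fs := by
      have h' : t ∉ (pre.flatMap (fun p => p.2) ++ fs) := by
        intro h
        exact ht (by rw [hK]; exact (PySem.Set.mem_ofList _ _).mpr h)
      simp only [List.mem_append] at h'
      exact ⟨fun h => h' (Or.inl h), fun h => h' (Or.inr h)⟩
    rw [pvStepFam, hcont]
    simp only [ite_true]
    rw [PySem.Dict.insert, if_neg (by simp [hcont])]
    -- the dict after inserting the fresh key with the empty set
    have hfind : ((pvG (pre ++ [(nom, fs)])).find? (fun p => p.1 == t)) = none := by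
      rw [List.find?_eq_none]
      intro p hp
      rw [hG] at hp
      rcases List.mem_map.mp hp with ⟨f, hfK, rfl⟩
      intro hbeq
      have hft : f = t := by simpa using hbeq
      exact ht (hft ▸ hfK)
    have hget2 : (PySem.Dict.mk (pvG (pre ++ [(nom, fs)]) ++ [(t, ([] : List String))])).get? t
        = some [] := by
      rw [PySem.Dict.get?]
      simp only [List.find?_append, hfind, Option.none_or]
      simp [List.find?]
    have hcont2 : (PySem.Dict.mk (pvG (pre ++ [(nom, fs)]) ++ [(t, ([] : List String))])).contains t
        = true := by
      rw [PySem.Dict.contains_eq_isSome_get?, hget2]; rfl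
    rw [PySem.Dict.modify, PySem.Dict.getD, hget2]
    rw [PySem.Dict.insert, if_pos hcont2]
    have haddnil : PySem.Set.add ([] : PySem.Set String) nom = [nom] := by
      simp [PySem.Set.add, PySem.Set.contains]
    rw [hG', PySem.Set.ofList_append_singleton, ← hK]
    have haddK : PySem.Set.add K t = K ++ [t] := by
      simp [PySem.Set.add, PySem.Set.contains, ht]
    rw [haddK]
    simp only [List.map_append, Option.getD_some]
    congr 1
    have hvals : pvVals (pre ++ [(nom, fs ++ [t])]) t = [nom] := by
      rw [pvVals_append_self, pvVals_of_not_mem pre nom fs t hnotpre.1 hnotpre.2, haddnil]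
    have hmap1 : List.map
        (fun p : String × List String => if (p.1 == t) = true then (t, PySem.Set.add [] nom) else p)
        (pvG (pre ++ [(nom, fs)]))
        = List.map (fun f => (f, pvVals (pre ++ [(nom, fs ++ [t])]) f)) K := by
      rw [hG, List.map_map]
      refine List.map_congr_left ?_
      intro f hfK
      have hf : f ≠ t := fun h => ht (h ▸ hfK)
      have hbeq : (f == t) = false := by simpa using hf
      simp only [Function.comp_apply, hbeq, Bool.false_eq_true, if_false]
      rw [pvVals_append_ne pre nom fs t f hf]
    rw [hmap1]
    simp [hvals]

lemma foldl_stepFam (nom : String) (fams : List String) :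
    ∀ (fs : List String) (pre : List (String × List String)),
      fams.foldl (pvStepFam nom) (PySem.Dict.mk (pvG (pre ++ [(nom, fs)])))
        = PySem.Dict.mk (pvG (pre ++ [(nom, fs ++ fams)])) := by
  induction fams with
  | nil => intro fs pre; simp
  | cons t rest ih =>
      intro fs pre
      rw [List.foldl_cons, stepFam_mk, ih (fs ++ [t])]
      simp

lemma stepPoke_mk (pre : List (String × List String)) (p : String × List String) :
    pvStepPoke (PySem.Dict.mk (pvG pre)) p = PySem.Dict.mk (pvG (pre ++ [p])) := by
  have h0 : pvG pre = pvG (pre ++ [(p.1, ([] : List String))]) := (pvG_append_nil pre p.1).symm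
  show p.2.foldl (pvStepFam p.1) (PySem.Dict.mk (pvG pre)) = _
  rw [h0, foldl_stepFam p.1 p.2 [] pre]
  simp

lemma foldl_stepPoke (l : List (String × List String)) :
    ∀ (pre : List (String × List String)),
      l.foldl pvStepPoke (PySem.Dict.mk (pvG pre)) = PySem.Dict.mk (pvG (pre ++ l)) := by
  induction l with
  | nil => intro pre; simp
  | cons p rest ih =>
      intro pre
      rw [List.foldl_cons, stepPoke_mk, ih (pre ++ [p])]
      simp

-- ===== VERDICT (by name: the statement is the Claim_ definition above) =====
theorem dico_par_famille_v2_spec : Claim_equal_dico_par_famille_v2 := by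
  intro pokedex _ _
  show dico_par_famille_v2 pokedex = dico_par_famille_v2_alt pokedex
  rw [alt_eq_pvG]
  have : PySem.Dict.empty = PySem.Dict.mk (pvG ([] : List (String × List String))) := rfl
  unfold dico_par_famille_v2
  rw [this, foldl_stepPoke pokedex []]
  simp
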